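-- pv_equiv track=rewrite | github.com/Emaisty/Tetris-AI | AI_main.py | clear_line
-- ===== SOURCE A (Python) =====
-- FIELD_SIZE = [20, 10]
--
-- def clear_line(field):
--     """
--     counts and clears full lines
--     :param field:
--     :return: field
--     """
--     full_cnt = 0
--     i = 0
--     while i < len(field):
--         if all(field[i]) == 1:
--             full_cnt += 1
--             del field[i]
--             field.insert(0, [0]*FIELD_SIZE[1])
--         else:
--             i += 1
--     return field, full_cnt
-- ===== SOURCE B (Python) =====
-- FIELD_SIZE = [20, 10]
--
-- def clear_line(field):
--     """counts and clears full lines, rebuilding the field in one pass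
--     (mutates `field` in place via slice assignment, like A)"""
--     kept = [row for row in field if not all(row)]
--     full_cnt = len(field) - len(kept)
--     field[:] = [[0] * FIELD_SIZE[1] for _ in range(full_cnt)] + kept
--     return field, full_cnt
-- ===== Notes on version B (the rewrite author's own statement) =====
-- stated objective: simpler
-- what changed: Replaces the while loop with repeated del/insert shifting by a single filter pass: keep non-full rows, count full ones, and rebuild the field as fresh zero-rows on top of the kept rows via one slice assignment.
import Mathlib
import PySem

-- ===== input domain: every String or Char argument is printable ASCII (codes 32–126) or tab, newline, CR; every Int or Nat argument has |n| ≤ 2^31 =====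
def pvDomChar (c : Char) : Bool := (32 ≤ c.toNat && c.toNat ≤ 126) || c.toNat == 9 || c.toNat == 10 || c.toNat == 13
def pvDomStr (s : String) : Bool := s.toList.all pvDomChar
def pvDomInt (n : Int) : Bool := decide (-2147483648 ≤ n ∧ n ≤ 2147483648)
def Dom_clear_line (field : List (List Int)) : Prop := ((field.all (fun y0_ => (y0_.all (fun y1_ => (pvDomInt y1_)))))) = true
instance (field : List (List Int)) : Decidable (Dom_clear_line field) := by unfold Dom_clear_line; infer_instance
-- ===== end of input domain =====

-- B rebuilds the field in one filter pass instead of A's del/insert shifting; both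
-- Pythons mutate `field` in place the same way, the theorems are about the return value.

-- ===== PORT A =====
-- helper: Python truthiness test `all(row) == 1` (every entry nonzero)
def pvIsFull (row : List Int) : Bool := row.all (fun x => decide (x ≠ 0))

-- termination helper for the while loop (cited by decreasing_by below)
theorem pvCountP_eraseIdx {α : Type} (p : α → Bool) (l : List α) (i : Nat)
    (h : i < l.length) (hp : p l[i] = true) :
    (l.eraseIdx i).countP p + 1 = l.countP p := by
  induction l generalizing i with
  | nil => simp at h
  | cons a t ih =>
    cases i with
    | zero => simpa [List.countP_cons] using hp ▸ rfl
    | succ n =>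
      have h' : n < t.length := by simpa using h
      have := ih n h' (by simpa using hp)
      simp only [List.eraseIdx, List.countP_cons]
      omega

-- the while loop of A: state (field, i, full_cnt); del field[i] + insert(0, [0]*10)
def clearLoopA (field : List (List Int)) (i : Nat) (cnt : Int) : List (List Int) × Int :=
  if h : i < field.length then
    if hf : pvIsFull field[i] = true then
      -- full_cnt += 1; del field[i]; field.insert(0, [0]*FIELD_SIZE[1])
      clearLoopA (List.replicate 10 (0 : Int) :: field.eraseIdx i) i (cnt + 1)
    else
      clearLoopA field (i + 1) cnt
  else
    (field, cnt)
termination_by field.countP pvIsFull + (field.length - i)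
decreasing_by
  · have hc := pvCountP_eraseIdx pvIsFull field i h hf
    have hz : pvIsFull (List.replicate 10 (0 : Int)) = false := by decide
    have hl : (field.eraseIdx i).length + 1 = field.length :=
      by rw [List.length_eraseIdx_of_lt h]; omega
    have hcons : (List.replicate 10 (0 : Int) :: field.eraseIdx i).countP pvIsFull
        = (field.eraseIdx i).countP pvIsFull := by
      rw [List.countP_cons, hz]; simp
    rw [hcons, List.length_cons, hl]
    omega
  · omega

def clear_line (field : List (List Int)) : List (List Int) × Int :=
  clearLoopA field 0 0

-- ===== PORT B =====
def clear_line_alt (field : List (List Int)) : List (List Int) × Int :=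
  -- kept = [row for row in field if not all(row)]
  let kept := field.filter (fun row => !(row.all (fun x => decide (x ≠ 0))))
  -- full_cnt = len(field) - len(kept)
  let full_cnt := field.length - kept.length
  -- [[0]*FIELD_SIZE[1] for _ in range(full_cnt)] + kept
  (List.replicate full_cnt (List.replicate 10 (0 : Int)) ++ kept, (full_cnt : Int))

-- ===== PRECONDITION & SPEC =====
def Spec_clear_line (field : List (List Int)) (out : List (List Int) × Int) : Prop := out = clear_line_alt field
instance (field : List (List Int)) (out : List (List Int) × Int) : Decidable (Spec_clear_line field out) := by unfold Spec_clear_line; infer_instance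

-- ===== CLAIM (what is proved, stated in full; the proofs are below) =====
def Claim_equal_clear_line : Prop := ∀ (field : List (List Int)), Dom_clear_line field → Spec_clear_line field (clear_line field)

-- ===== LEMMAS AND PROOFS =====

-- loop invariant: all rows before index i are non-full; then the loop returns the
-- zero-rows-on-top rebuild of the whole field, counting the full rows of the suffix.
theorem pvReplicate_append_cons {α : Type} (n : Nat) (z : α) (L : List α) :
    List.replicate n z ++ z :: L = List.replicate (n + 1) z ++ L := by
  rw [List.replicate_succ', List.append_assoc, List.singleton_append]

theorem pvCountP_filter_not {α : Type} (p : α → Bool) (l : List α) :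
    l.countP p + (l.filter (fun a => !p a)).length = l.length := by
  induction l with
  | nil => simp
  | cons a t ih =>
    by_cases hp : p a = true <;> simp [hp] <;> omega

theorem clearLoopA_eq : ∀ (field : List (List Int)) (i : Nat) (cnt : Int),
    (∀ r ∈ field.take i, pvIsFull r = false) →
    clearLoopA field i cnt =
      (List.replicate ((field.drop i).countP pvIsFull) (List.replicate 10 (0 : Int)) ++
         field.filter (fun r => !pvIsFull r),
       cnt + ((field.drop i).countP pvIsFull : Int)) := by
  intro field i cnt
  induction field, i, cnt using clearLoopA.induct with
  | case1 field i cnt h hf ih =>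
    intro hpre
    have hz : pvIsFull (List.replicate 10 (0 : Int)) = false := by decide
    have hpre' : ∀ r ∈ (List.replicate 10 (0 : Int) :: field.eraseIdx i).take i,
        pvIsFull r = false := by
      intro r hr
      cases i with
      | zero => simp at hr
      | succ n =>
        rw [List.take_succ_cons] at hr
        rcases List.mem_cons.mp hr with h0 | h1
        · rw [h0]; exact hz
        · have hE : (field.eraseIdx n.succ).take n = (field.take (n + 1)).take n := by
            rw [List.eraseIdx_eq_take_drop_succ, List.take_append_of_le_length]
            simp only [List.length_take]
            omega
          exact hpre r (List.mem_of_mem_take (hE ▸ h1))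
    have hkE := pvCountP_eraseIdx pvIsFull field i h hf
    have hpre0 : (field.take i).countP pvIsFull = 0 :=
      List.countP_eq_zero.mpr (fun a ha => by simp [hpre a ha])
    have hsplit : ∀ (l : List (List Int)) (j : Nat),
        (l.take j).countP pvIsFull + (l.drop j).countP pvIsFull = l.countP pvIsFull := by
      intro l j
      conv_rhs => rw [← List.take_append_drop j l]
      rw [List.countP_append]
    have hk : (field.drop i).countP pvIsFull = field.countP pvIsFull := by
      have := hsplit field i; omega
    have hpre0' : (((List.replicate 10 (0 : Int) :: field.eraseIdx i)).take i).countP pvIsFull = 0 :=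
      List.countP_eq_zero.mpr (fun a ha => by simp [hpre' a ha])
    have hk' : ((List.replicate 10 (0 : Int) :: field.eraseIdx i).drop i).countP pvIsFull
        = (field.eraseIdx i).countP pvIsFull := by
      have h1 := hsplit (List.replicate 10 (0 : Int) :: field.eraseIdx i) i
      rw [List.countP_cons, hz] at h1
      simp only [Bool.false_eq_true, if_false] at h1
      omega
    have htake : (field.take i).filter (fun r => !pvIsFull r) = field.take i :=
      List.filter_eq_self.mpr (fun a ha => by simp [hpre a ha])
    have hfilF : field.filter (fun r => !pvIsFull r)
        = field.take i ++ (field.drop (i + 1)).filter (fun r => !pvIsFull r) := by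
      conv_lhs => rw [← List.take_append_drop i field, ← List.getElem_cons_drop h]
      rw [List.filter_append, htake, List.filter_cons]
      simp [hf]
    have hfil' : (List.replicate 10 (0 : Int) :: field.eraseIdx i).filter (fun r => !pvIsFull r)
        = List.replicate 10 (0 : Int) ::
            (field.take i ++ (field.drop (i + 1)).filter (fun r => !pvIsFull r)) := by
      rw [List.filter_cons]
      simp only [hz, Bool.not_false, if_true]
      rw [List.eraseIdx_eq_take_drop_succ, List.filter_append, htake]
    rw [clearLoopA, dif_pos h, dif_pos hf, ih hpre']
    rw [hk', hfil', hk, hfilF, ← hkE]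
    simp only [Prod.mk.injEq]
    refine ⟨?_, ?_⟩
    · exact pvReplicate_append_cons _ _ _
    · push_cast; ring
  | case2 field i cnt h hf ih =>
    intro hpre
    have hfb : pvIsFull field[i] = false := by simpa using hf
    have hpre' : ∀ r ∈ field.take (i + 1), pvIsFull r = false := by
      intro r hr
      rw [List.take_add_one] at hr
      simp only [List.getElem?_eq_getElem h] at hr
      rcases List.mem_append.mp hr with h1 | h2
      · exact hpre r h1
      · simp only [Option.toList_some, List.mem_singleton] at h2
        rw [h2]; exact hfb
    rw [clearLoopA, dif_pos h, dif_neg hf, ih hpre']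
    have hd : (field.drop i).countP pvIsFull = (field.drop (i + 1)).countP pvIsFull := by
      rw [← List.getElem_cons_drop h, List.countP_cons, hfb]
      simp
    rw [hd]
  | case3 field i cnt h =>
    intro hpre
    have hlen : field.length ≤ i := by omega
    have hd : field.drop i = [] := List.drop_eq_nil_of_le hlen
    have ht : field.take i = field := List.take_of_length_le hlen
    have : field.filter (fun r => !pvIsFull r) = field :=
      List.filter_eq_self.mpr (fun a ha => by simp [hpre a (by rw [ht]; exact ha)])
    rw [clearLoopA, dif_neg h, hd, this]
    simp


theorem clear_line_spec : Claim_equal_clear_line := by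
  intro field _
  unfold Spec_clear_line clear_line clear_line_alt
  rw [clearLoopA_eq field 0 0 (by simp), List.drop_zero]
  have h := pvCountP_filter_not pvIsFull field
  have hc : field.countP pvIsFull
      = field.length - (field.filter (fun r => !pvIsFull r)).length := by omega
  rw [hc]
  simp [pvIsFull]
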